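-- pv_equiv track=rewrite | github.com/jstnliu/python_functions_lab | main.py | steps_to_zero
-- ===== SOURCE A (Python) =====
-- def steps_to_zero(num):
--     steps = 0
--     integer = int(num)
--     while integer > 0:
--         if integer % 2 == 0:
--             integer /= 2
--         else:
--             integer -= 1
--         steps += 1
--     return steps
-- ===== SOURCE B (Python) =====
-- def steps_to_zero(num):
--     integer = int(num)
--     if integer <= 0:
--         return 0
--     return integer.bit_length() - 1 + bin(integer).count('1')
-- ===== Notes on version B (the rewrite author's own statement) =====
-- stated objective: alternative
-- what changed: Replaced the step-by-step halve/decrement loop with a closed-form count: bit_length()-1 halvings plus one decrement per set bit (popcount).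
import Mathlib
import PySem

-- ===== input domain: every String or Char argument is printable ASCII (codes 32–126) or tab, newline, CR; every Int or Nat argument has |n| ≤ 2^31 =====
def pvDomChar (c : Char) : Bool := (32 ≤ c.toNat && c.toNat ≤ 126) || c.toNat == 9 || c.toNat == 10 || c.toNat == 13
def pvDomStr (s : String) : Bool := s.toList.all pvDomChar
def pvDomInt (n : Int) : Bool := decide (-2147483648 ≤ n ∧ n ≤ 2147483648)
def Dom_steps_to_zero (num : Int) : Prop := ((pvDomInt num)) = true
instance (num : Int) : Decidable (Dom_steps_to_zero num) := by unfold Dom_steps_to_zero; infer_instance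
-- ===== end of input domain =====

-- B replaces A's halve/decrement loop by the closed form bit_length-1 + popcount (no loop).

-- ===== PORT A =====
-- A's while loop: halve when even, decrement when odd, counting steps.
-- (Python's 'integer /= 2' is float division; on even ints in Dom it is value-exact, ported as exact /2.
--  fuel only makes the recursion structural: the loop body runs at most num.toNat times.)
def stepsLoopA : Nat → Int → Int → Int
  | 0, _, steps => steps
  | fuel + 1, integer, steps =>
    if integer > 0 then
      if integer % 2 == 0 then stepsLoopA fuel (integer / 2) (steps + 1)
      else stepsLoopA fuel (integer - 1) (steps + 1)
    else steps

def steps_to_zero (num : Int) : Int := stepsLoopA (num.toNat + 1) num 0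

-- ===== PORT B =====
-- port of integer.bit_length() (number of bits, 0 for 0); fuel n suffices since n halves each step
def pyBitLength : Nat → Nat → Nat
  | 0, _ => 0
  | fuel + 1, n => if n = 0 then 0 else pyBitLength fuel (n / 2) + 1

-- port of bin(integer).count('1') (popcount)
def pyPopCount : Nat → Nat → Nat
  | 0, _ => 0
  | fuel + 1, n => if n = 0 then 0 else n % 2 + pyPopCount fuel (n / 2)

def steps_to_zero_alt (num : Int) : Int :=
  if num ≤ 0 then 0
  else (pyBitLength num.toNat num.toNat : Int) - 1 + (pyPopCount num.toNat num.toNat : Int)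

-- ===== PRECONDITION & SPEC =====
def Spec_steps_to_zero (num : Int) (out : Int) : Prop := out = steps_to_zero_alt num
instance (num : Int) (out : Int) : Decidable (Spec_steps_to_zero num out) := by unfold Spec_steps_to_zero; infer_instance

-- ===== CLAIM (what is proved, stated in full; the proofs are below) =====
def Claim_equal_steps_to_zero : Prop := ∀ (num : Int), Dom_steps_to_zero num → Spec_steps_to_zero num (steps_to_zero num)

-- ===== LEMMAS AND PROOFS =====

-- closed form as a function of the natural number, for the induction
def fClosed (n : Nat) : Int :=
  if n = 0 then 0 else (pyBitLength n n : Int) - 1 + (pyPopCount n n : Int)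

-- fuel irrelevance for the two bit helpers
lemma pyBitLength_irrel : ∀ n f1 f2, n ≤ f1 → n ≤ f2 → pyBitLength f1 n = pyBitLength f2 n := by
  intro n
  induction n using Nat.strong_induction_on with
  | _ n ih =>
    intro f1 f2 h1 h2
    by_cases hn : n = 0
    · subst hn
      cases f1 <;> cases f2 <;> simp [pyBitLength]
    · obtain ⟨g1, rfl⟩ : ∃ g, f1 = g + 1 := ⟨f1 - 1, by omega⟩
      obtain ⟨g2, rfl⟩ : ∃ g, f2 = g + 1 := ⟨f2 - 1, by omega⟩
      simp only [pyBitLength, hn, if_false]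
      rw [ih (n / 2) (by omega) g1 g2 (by omega) (by omega)]

lemma pyPopCount_irrel : ∀ n f1 f2, n ≤ f1 → n ≤ f2 → pyPopCount f1 n = pyPopCount f2 n := by
  intro n
  induction n using Nat.strong_induction_on with
  | _ n ih =>
    intro f1 f2 h1 h2
    by_cases hn : n = 0
    · subst hn
      cases f1 <;> cases f2 <;> simp [pyPopCount]
    · obtain ⟨g1, rfl⟩ : ∃ g, f1 = g + 1 := ⟨f1 - 1, by omega⟩
      obtain ⟨g2, rfl⟩ : ∃ g, f2 = g + 1 := ⟨f2 - 1, by omega⟩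
      simp only [pyPopCount, hn, if_false]
      rw [ih (n / 2) (by omega) g1 g2 (by omega) (by omega)]

lemma pyBitLength_step {f n : Nat} (hn : n ≠ 0) (hf : n ≤ f) :
    pyBitLength f n = pyBitLength (n / 2) (n / 2) + 1 := by
  obtain ⟨g, rfl⟩ : ∃ g, f = g + 1 := ⟨f - 1, by omega⟩
  simp only [pyBitLength, hn, if_false]
  rw [pyBitLength_irrel (n / 2) g (n / 2) (by omega) (le_refl _)]

lemma pyPopCount_step {f n : Nat} (hn : n ≠ 0) (hf : n ≤ f) :
    pyPopCount f n = n % 2 + pyPopCount (n / 2) (n / 2) := by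
  obtain ⟨g, rfl⟩ : ∃ g, f = g + 1 := ⟨f - 1, by omega⟩
  simp only [pyPopCount, hn, if_false]
  rw [pyPopCount_irrel (n / 2) g (n / 2) (by omega) (le_refl _)]

-- the loop computes steps + fClosed n, for any sufficient fuel
lemma stepsLoopA_eq : ∀ n : Nat, ∀ fuel : Nat, n ≤ fuel → ∀ s : Int,
    stepsLoopA fuel (n : Int) s = s + fClosed n := by
  intro n
  induction n using Nat.strong_induction_on with
  | _ n ih =>
    intro fuel hfuel s
    rcases Nat.eq_zero_or_pos n with h0 | hpos
    · subst h0
      cases fuel <;> simp [stepsLoopA, fClosed]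
    · have hne : n ≠ 0 := Nat.pos_iff_ne_zero.mp hpos
      obtain ⟨g, rfl⟩ : ∃ g, fuel = g + 1 := ⟨fuel - 1, by omega⟩
      have hgt : (n : Int) > 0 := by exact_mod_cast hpos
      rcases Nat.even_or_odd n with he | ho
      · -- even case: halve
        have hm : n % 2 = 0 := Nat.even_iff.mp he
        have hmi : (n : Int) % 2 = 0 := by
          have : ((n % 2 : Nat) : Int) = (n : Int) % 2 := by push_cast; rfl
          omega
        have hdiv : (n : Int) / 2 = ((n / 2 : Nat) : Int) := by push_cast; rfl
        simp only [stepsLoopA, hgt, if_pos, hmi, beq_iff_eq]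
        rw [hdiv, ih (n / 2) (by omega) g (by omega) (s + 1)]
        have hhalf : n / 2 ≠ 0 := by omega
        rw [fClosed, fClosed]
        simp only [hne, hhalf, if_false]
        rw [pyBitLength_step hne (le_refl n), pyPopCount_step hne (le_refl n), hm]
        push_cast; ring
      · -- odd case: decrement
        have hm : n % 2 = 1 := Nat.odd_iff.mp ho
        have hmi : (n : Int) % 2 = 1 := by
          have : ((n % 2 : Nat) : Int) = (n : Int) % 2 := by push_cast; rfl
          omega
        have hsub : (n : Int) - 1 = ((n - 1 : Nat) : Int) := by omega
        simp only [stepsLoopA, hgt, if_pos, beq_iff_eq, hmi]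
        rw [if_neg (by norm_num), hsub, ih (n - 1) (by omega) g (by omega) (s + 1)]
        by_cases h1 : n = 1
        · subst h1
          rw [fClosed, fClosed]
          norm_num
          rw [pyBitLength_step (by norm_num) (le_refl 1), pyPopCount_step (by norm_num) (le_refl 1)]
          norm_num [pyBitLength, pyPopCount]
        · -- n odd, n ≥ 3
          have hne' : n - 1 ≠ 0 := by omega
          have hq : (n - 1) / 2 = n / 2 := by omega
          have hm' : (n - 1) % 2 = 0 := by omega
          rw [fClosed, fClosed]
          simp only [hne, hne', if_false]
          rw [pyBitLength_step hne (le_refl n), pyPopCount_step hne (le_refl n),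
              pyBitLength_step hne' (le_refl (n - 1)), pyPopCount_step hne' (le_refl (n - 1)),
              hq, hm, hm']
          push_cast; ring

-- ===== VERDICT (by name: the statement is the Claim_ definition above) =====
theorem steps_to_zero_spec : Claim_equal_steps_to_zero := by
  intro num _
  unfold Spec_steps_to_zero steps_to_zero steps_to_zero_alt
  by_cases h : num ≤ 0
  · simp [stepsLoopA, h]
  · obtain ⟨m, hm⟩ : ∃ m : Nat, num = (m : Int) := ⟨num.toNat, by omega⟩
    subst hm
    have hm0 : m ≠ 0 := by omega
    rw [if_neg h, Int.toNat_natCast, stepsLoopA_eq m (m + 1) (by omega) 0, fClosed]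
    simp [hm0]
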